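-- pv_equiv track=rewrite | github.com/Bogfoot/PhDCode | TimeTagger/quTAG_MC-Software_Python-examples-20220711/OvenLibV2.py | string_bit_converter
-- ===== SOURCE A (Python) =====
-- def string_bit_converter(input_list):
--     output_string = [""]
--     j = 0
--     for i in range(4, len(input_list)):
--         if input_list[i] == ";":
--             output_string.append("")
--             j += 1
--         elif input_list[i] != "\x01":
--             output_string[j] += input_list[i]
--     return output_string
-- ===== SOURCE B (Python) =====
-- def string_bit_converter(input_list):
--     # build the segment list back-to-front: walk the tail in reverse,
--     # prepending characters to the current first segment
--     parts = [""]
--     for t in reversed(input_list[4:]):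
--         if t == ";":
--             parts.insert(0, "")
--         elif t != "\x01":
--             parts[0] = t + parts[0]
--     return parts
-- ===== Notes on version B (the rewrite author's own statement) =====
-- stated objective: alternative
-- what changed: Replaces the forward indexed loop with a mutable segment list and a manual segment counter j by a reverse walk over the tail that builds the segment list back-to-front, prepending characters to the current first segment.
import Mathlib
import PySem

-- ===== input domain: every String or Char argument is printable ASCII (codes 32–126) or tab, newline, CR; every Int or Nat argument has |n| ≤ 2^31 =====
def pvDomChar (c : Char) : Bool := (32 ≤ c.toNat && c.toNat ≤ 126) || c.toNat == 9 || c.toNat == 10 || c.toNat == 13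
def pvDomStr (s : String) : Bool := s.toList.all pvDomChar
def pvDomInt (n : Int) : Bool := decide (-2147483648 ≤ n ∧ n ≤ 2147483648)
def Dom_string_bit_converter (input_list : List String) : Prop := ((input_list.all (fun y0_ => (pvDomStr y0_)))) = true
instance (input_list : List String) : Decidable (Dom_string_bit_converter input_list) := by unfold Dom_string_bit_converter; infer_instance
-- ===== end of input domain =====

-- ===== PORT A =====
-- A: for i in range(4, len(input_list)) over a mutable (output_string, j) state.
def string_bit_converter (input_list : List String) : List String :=
  ((PySem.List.pyRange 4 (PySem.List.len input_list) 1).foldl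
    (fun (st : List String × Int) i =>
      if PySem.List.pyGetD input_list i "" = ";" then (st.1 ++ [""], st.2 + 1)
      else if PySem.List.pyGetD input_list i "" ≠ "\x01" then
        (PySem.List.pySetD st.1 st.2
          (PySem.List.pyGetD st.1 st.2 "" ++ PySem.List.pyGetD input_list i ""), st.2)
      else st)
    ([""], 0)).1

-- ===== PORT B =====
-- B: walk the tail in reverse, building the segment list back-to-front.
def string_bit_converter_alt (input_list : List String) : List String :=
  (PySem.List.slice input_list (some 4) none).reverse.foldl
    (fun (parts : List String) t =>
      if t = ";" then PySem.List.insert parts 0 ""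
      else if t ≠ "\x01" then
        PySem.List.pySetD parts 0 (t ++ PySem.List.pyGetD parts 0 "")
      else parts)
    [""]

-- ===== PRECONDITION & SPEC =====
def Spec_string_bit_converter (input_list : List String) (out : List String) : Prop := out = string_bit_converter_alt input_list
instance (input_list : List String) (out : List String) : Decidable (Spec_string_bit_converter input_list out) := by unfold Spec_string_bit_converter; infer_instance

-- ===== CLAIM (what is proved, stated in full; the proofs are below) =====
def Claim_equal_string_bit_converter : Prop := ∀ (input_list : List String), Dom_string_bit_converter input_list → Spec_string_bit_converter input_list (string_bit_converter input_list)

-- ===== LEMMAS AND PROOFS =====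
-- proof-side view of B: the same back-to-front construction as structural recursion
def sbcGo : List String → List String
  | [] => [""]
  | t :: toks =>
    let rest := sbcGo toks
    if t = ";" then "" :: rest
    else if t = "\x01" then rest
    else (t ++ rest.headD "") :: rest.tail

theorem sbcGo_ne_nil (ts : List String) : sbcGo ts ≠ [] := by
  induction ts with
  | nil => simp [sbcGo]
  | cons t toks ih =>
    simp only [sbcGo]
    split_ifs with h1 h2
    · simp
    · simpa using ih
    · simp

theorem sbcGo_key (ts pre : List String) (s : String) :
    (ts.foldl
      (fun (st : List String × Int) x =>
        if x = ";" then (st.1 ++ [""], st.2 + 1)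
        else if x ≠ "\x01" then
          (PySem.List.pySetD st.1 st.2 (PySem.List.pyGetD st.1 st.2 "" ++ x), st.2)
        else st)
      (pre ++ [s], (pre.length : Int))).1
    = pre ++ (s ++ (sbcGo ts).headD "") :: (sbcGo ts).tail := by
  induction ts generalizing pre s with
  | nil => simp [sbcGo]
  | cons t toks ih =>
    rw [List.foldl_cons]
    by_cases h1 : t = ";"
    · subst h1
      rw [if_pos rfl]
      rw [show (pre ++ [s] ++ [""], (pre.length : Int) + 1)
            = ((pre ++ [s]) ++ [""], ((pre ++ [s]).length : Int)) by simp]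
      rw [ih (pre ++ [s]) ""]
      cases hg : sbcGo toks with
      | nil => exact absurd hg (sbcGo_ne_nil toks)
      | cons a l => simp [sbcGo, hg]
    · by_cases h2 : t = "\x01"
      · subst h2
        rw [if_neg (by decide), if_neg (by decide)]
        rw [ih pre s]
        simp [sbcGo]
      · rw [if_neg h1, if_pos h2]
        have hget : PySem.List.pyGetD (pre ++ [s]) ((pre.length : Nat) : Int) "" = s := by
          rw [PySem.List.pyGetD_natCast]
          simp
        have hset : PySem.List.pySetD (pre ++ [s]) ((pre.length : Nat) : Int) (s ++ t)
            = pre ++ [s ++ t] := by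
          rw [PySem.List.pySetD_natCast]
          simp
        rw [hget, hset, ih pre (s ++ t)]
        cases hg : sbcGo toks with
        | nil => exact absurd hg (sbcGo_ne_nil toks)
        | cons a l => simp [sbcGo, hg, h1, h2, String.append_assoc]


theorem sbcGo_eq_foldl_rev (ts : List String) :
    ts.reverse.foldl
      (fun (parts : List String) t =>
        if t = ";" then PySem.List.insert parts 0 ""
        else if t ≠ "\x01" then
          PySem.List.pySetD parts 0 (t ++ PySem.List.pyGetD parts 0 "")
        else parts)
      [""] = sbcGo ts := by
  induction ts with
  | nil => simp [sbcGo]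
  | cons t toks ih =>
    rw [List.reverse_cons, List.foldl_append, ih, List.foldl_cons, List.foldl_nil]
    cases hg : sbcGo toks with
    | nil => exact absurd hg (sbcGo_ne_nil toks)
    | cons a l =>
      by_cases h1 : t = ";"
      · simp [sbcGo, h1, PySem.List.insert_zero, hg]
      · by_cases h2 : t = "\x01"
        · simp [sbcGo, h2, hg]
        · simp [sbcGo, h1, h2, hg, PySem.List.pySetD, PySem.List.pyGetD, PySem.List.pySet?, PySem.List.pyGet?, PySem.List.pyIdx?]

-- ===== VERDICT (by name: the statement is the Claim_ definition above) =====
theorem string_bit_converter_spec : Claim_equal_string_bit_converter := by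
  intro input_list _
  unfold Spec_string_bit_converter string_bit_converter string_bit_converter_alt
  have hconv := PySem.List.foldl_pyRange_pyGetD input_list ""
    (fun (st : List String × Int) x =>
      if x = ";" then (st.1 ++ [""], st.2 + 1)
      else if x ≠ "\x01" then
        (PySem.List.pySetD st.1 st.2 (PySem.List.pyGetD st.1 st.2 "" ++ x), st.2)
      else st)
    ([""], 0) (a := 4) (by norm_num)
  beta_reduce at hconv
  rw [hconv]
  have hkey := sbcGo_key (input_list.drop 4) [] ""
  simp only [List.nil_append, List.length_nil, Nat.cast_zero] at hkey
  have h4 : (4 : Int).toNat = 4 := rfl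
  rw [h4, hkey]
  have hs : PySem.List.slice input_list (some 4) none = input_list.drop 4 := by
    rw [show (4 : Int) = ((4 : Nat) : Int) from rfl, PySem.List.slice_from_natCast]
  rw [hs, sbcGo_eq_foldl_rev]
  have hne := sbcGo_ne_nil (input_list.drop 4)
  cases h : sbcGo (input_list.drop 4) with
  | nil => exact absurd h hne
  | cons a l => simp
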